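-- pv_equiv track=rewrite | github.com/teljoa/p | PYTHON/Tema 2/Ejercicios/Boletin Modular 2/Boletin completo.py | isFriendNumber
-- ===== SOURCE A (Python) =====
-- def isFriendNumber(number, number2):
--     divisors=0
--     is_friend=False
--     for i in range(1, number):
--         if number%i==0:
--             divisors+=i
--
--     if divisors==number2:
--         is_friend=True
--
--     return is_friend
-- ===== SOURCE B (Python) =====
-- def isFriendNumber(number, number2):
--     if number < 2:
--         return number2 == 0
--     s = 1
--     i = 2
--     while i * i <= number:
--         if number % i == 0:
--             s += i
--             j = number // i
--             if j != i:
--                 s += j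
--         i += 1
--     return s == number2
-- ===== Notes on version B (the rewrite author's own statement) =====
-- stated objective: faster
-- what changed: replaced the linear scan over all i < n summing divisors with a sqrt(n) loop that adds each divisor pair (i, n//i) at once
import Mathlib
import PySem

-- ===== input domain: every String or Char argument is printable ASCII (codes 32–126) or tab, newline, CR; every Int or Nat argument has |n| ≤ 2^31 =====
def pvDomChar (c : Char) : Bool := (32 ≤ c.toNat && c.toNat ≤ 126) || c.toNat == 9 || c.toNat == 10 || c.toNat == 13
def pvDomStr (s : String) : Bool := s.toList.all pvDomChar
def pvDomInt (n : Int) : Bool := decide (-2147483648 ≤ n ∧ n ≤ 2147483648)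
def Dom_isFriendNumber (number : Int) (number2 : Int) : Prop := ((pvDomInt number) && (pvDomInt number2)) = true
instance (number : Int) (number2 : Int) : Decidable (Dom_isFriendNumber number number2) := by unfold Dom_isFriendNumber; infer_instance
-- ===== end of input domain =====

-- B replaces A's O(n) scan by an O(√n) loop adding each divisor pair (i, n/i) at once.

-- ===== PORT A =====
def isFriendNumber (number : Int) (number2 : Int) : Bool :=
  let divisors := (PySem.List.pyRange 1 number 1).foldl
    (fun d i => if PySem.Int.mod number i = 0 then d + i else d) 0
  let is_friend := false
  if divisors = number2 then true else is_friend

-- ===== PORT B =====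
-- while i*i <= number loop of Source B; fuel is a structural bound on the iteration
-- count (number - 1 suffices since the loop stops once i exceeds √number ≤ number)
def isFriendNumberLoop (number : Int) : Nat → Int → Int → Int
  | 0, _, s => s
  | fuel + 1, i, s =>
    if i * i ≤ number then
      let s' :=
        if PySem.Int.mod number i = 0 then
          let j := PySem.Int.floordiv number i
          if j ≠ i then s + i + j else s + i
        else s
      isFriendNumberLoop number fuel (i + 1) s'
    else s

def isFriendNumber_alt (number : Int) (number2 : Int) : Bool :=
  if number < 2 then decide (number2 = 0)
  else decide (isFriendNumberLoop number (number - 1).toNat 2 1 = number2)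

-- ===== PRECONDITION & SPEC =====
def Spec_isFriendNumber (number : Int) (number2 : Int) (out : Bool) : Prop := out = isFriendNumber_alt number number2
instance (number : Int) (number2 : Int) (out : Bool) : Decidable (Spec_isFriendNumber number number2 out) := by unfold Spec_isFriendNumber; infer_instance

-- ===== CLAIM (what is proved, stated in full; the proofs are below) =====
def Claim_equal_isFriendNumber : Prop := ∀ (number : Int) (number2 : Int), Dom_isFriendNumber number number2 → Spec_isFriendNumber number number2 (isFriendNumber number number2)

-- ===== LEMMAS AND PROOFS =====

-- A's loop from a : sum of divisors of N in [a, N)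
theorem aLoop_eq (N : ℕ) : ∀ (a : ℕ) (s : Int), 1 ≤ a →
    (PySem.List.pyRange (a : Int) (N : Int) 1).foldl
      (fun d i => if PySem.Int.mod (N : Int) i = 0 then d + i else d) s
    = s + ∑ d ∈ Finset.Ico a N, (if d ∣ N then (d : Int) else 0) := by
  suffices h : ∀ (k a : ℕ) (s : Int), 1 ≤ a → N ≤ a + k →
      (PySem.List.pyRange (a : Int) (N : Int) 1).foldl
        (fun d i => if PySem.Int.mod (N : Int) i = 0 then d + i else d) s
      = s + ∑ d ∈ Finset.Ico a N, (if d ∣ N then (d : Int) else 0) by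
    intro a s ha; exact h N a s ha (by omega)
  intro k
  induction k with
  | zero =>
    intro a s ha hk
    rw [PySem.List.pyRange_one_eq_nil (by exact_mod_cast (by omega : N ≤ a)),
      Finset.Ico_eq_empty (by omega)]
    simp
  | succ k ih =>
    intro a s ha hk
    by_cases hlt : a < N
    · rw [PySem.List.pyRange_one_cons (by exact_mod_cast hlt), List.foldl_cons,
        PySem.Int.mod_natCast,
        show ((a : Int) + 1) = ((a + 1 : ℕ) : Int) by push_cast; ring,
        ih (a + 1) _ (by omega) (by omega),
        Finset.sum_eq_sum_Ico_succ_bot hlt]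
      by_cases hd : a ∣ N
      · rw [if_pos (by exact_mod_cast Nat.mod_eq_zero_of_dvd hd),
          if_pos hd]
        ring
      · rw [if_neg (by
            intro hc
            exact hd (Nat.dvd_of_mod_eq_zero (by exact_mod_cast hc))),
          if_neg hd]
        ring
    · rw [PySem.List.pyRange_one_eq_nil (by exact_mod_cast (by omega : N ≤ a)),
        Finset.Ico_eq_empty (by omega)]
      simp

-- B's loop from i : sum of pair contributions for small factors in [i, √N]
theorem bLoop_eq (N : ℕ) : ∀ (k i : ℕ) (s : Int), 1 ≤ i → Nat.sqrt N + 1 ≤ i + k →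
    isFriendNumberLoop (N : Int) k (i : Int) s
    = s + ∑ j ∈ Finset.Ico i (Nat.sqrt N + 1),
        (if j ∣ N then ((j : Int) + if N / j ≠ j then ((N / j : ℕ) : Int) else 0) else 0) := by
  intro k
  induction k with
  | zero =>
    intro i s hi hk
    rw [isFriendNumberLoop, Finset.Ico_eq_empty (by omega)]
    simp
  | succ k ih =>
    intro i s hi hk
    by_cases hle : i ≤ Nat.sqrt N
    · have hii : i * i ≤ N := Nat.le_sqrt.mp hle
      rw [isFriendNumberLoop, if_pos (by exact_mod_cast hii)]
      simp only [PySem.Int.mod_natCast, PySem.Int.floordiv_natCast]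
      rw [show ((i : Int) + 1) = ((i + 1 : ℕ) : Int) by push_cast; ring,
        ih (i + 1) _ (by omega) (by omega),
        Finset.sum_eq_sum_Ico_succ_bot (by omega : i < Nat.sqrt N + 1)]
      by_cases hd : i ∣ N
      · rw [if_pos (by exact_mod_cast Nat.mod_eq_zero_of_dvd hd),
          if_pos hd]
        by_cases hne : N / i = i
        · rw [if_neg (by exact_mod_cast not_not.mpr hne), if_neg (by omega)]
          ring
        · rw [if_pos (by exact_mod_cast hne), if_pos hne]
          ring
      · rw [if_neg (by
            intro hc
            exact hd (Nat.dvd_of_mod_eq_zero (by exact_mod_cast hc))),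
          if_neg hd]
        ring
    · rw [isFriendNumberLoop, if_neg (by
          intro hc
          exact hle (Nat.le_sqrt.mpr (by exact_mod_cast hc))),
        Finset.Ico_eq_empty (by omega)]
      simp

-- pairing the large divisors with the small ones
theorem pair_eq (N : ℕ) (h2 : 2 ≤ N) :
    1 + ∑ j ∈ Finset.Ico 2 (Nat.sqrt N + 1),
        (if j ∣ N then ((j : Int) + if N / j ≠ j then ((N / j : ℕ) : Int) else 0) else 0)
    = ∑ d ∈ Finset.Ico 1 N, (if d ∣ N then (d : Int) else 0) := by
  have hN0 : N ≠ 0 := by omega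
  rw [← Finset.sum_filter, ← Finset.sum_filter]
  rw [← Finset.sum_filter_add_sum_filter_not ((Finset.Ico 1 N).filter (· ∣ N))
        (fun d => d * d ≤ N) (fun d => (d : Int))]
  rw [Finset.sum_add_distrib, ← Finset.sum_filter]
  -- low part: small divisors are 1 together with the j's of the sqrt loop
  have hlow : (((Finset.Ico 1 N).filter (· ∣ N)).filter (fun d => d * d ≤ N))
      = insert 1 ((Finset.Ico 2 (Nat.sqrt N + 1)).filter (· ∣ N)) := by
    ext d
    simp only [Finset.mem_filter, Finset.mem_Ico, Finset.mem_insert]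
    constructor
    · rintro ⟨⟨⟨h1, hlt⟩, hd⟩, hsq⟩
      by_cases hone : d = 1
      · exact Or.inl hone
      · exact Or.inr ⟨⟨by omega, by have := Nat.le_sqrt.mpr hsq; omega⟩, hd⟩
    · rintro (rfl | ⟨⟨h2d, hsq⟩, hd⟩)
      · exact ⟨⟨⟨le_refl 1, by omega⟩, one_dvd N⟩, by omega⟩
      · have hdd : d * d ≤ N := Nat.le_sqrt.mp (by omega)
        have hdN : d < N := by nlinarith
        exact ⟨⟨⟨by omega, hdN⟩, hd⟩, hdd⟩
  have hnotmem : (1 : ℕ) ∉ (Finset.Ico 2 (Nat.sqrt N + 1)).filter (· ∣ N) := by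
    simp [Finset.mem_filter, Finset.mem_Ico]
  rw [hlow, Finset.sum_insert hnotmem]
  -- high part: large proper divisors d ↔ small cofactors j = N / d with N / j ≠ j
  have hhigh : ∑ d ∈ ((Finset.Ico 1 N).filter (· ∣ N)).filter (fun d => ¬ d * d ≤ N), (d : Int)
      = ∑ j ∈ ((Finset.Ico 2 (Nat.sqrt N + 1)).filter (· ∣ N)).filter (fun j => N / j ≠ j),
          ((N / j : ℕ) : Int) := by
    refine Finset.sum_nbij' (fun d => N / d) (fun j => N / j) ?_ ?_ ?_ ?_ ?_
    · intro d hd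
      simp only [Finset.mem_filter, Finset.mem_Ico] at hd ⊢
      obtain ⟨⟨⟨h1, hlt⟩, hdv⟩, hsq⟩ := hd
      have hqd : N / d * d = N := Nat.div_mul_cancel hdv
      have hq1 : 1 ≤ N / d := Nat.div_pos (by omega) (by omega)
      have hqne1 : N / d ≠ 1 := by
        intro hc; rw [hc] at hqd; omega
      have hqlt : N / d < d := by nlinarith [hqd]
      have hqq : N / d * (N / d) ≤ N := by nlinarith [hqd]
      refine ⟨⟨⟨by omega, by have := Nat.le_sqrt.mpr hqq; omega⟩, ⟨d, hqd.symm⟩⟩, ?_⟩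
      rw [Nat.div_div_self hdv hN0]; omega
    · intro j hj
      simp only [Finset.mem_filter, Finset.mem_Ico] at hj ⊢
      obtain ⟨⟨⟨h2j, hjs⟩, hjv⟩, hne⟩ := hj
      have hdj : N / j * j = N := Nat.div_mul_cancel hjv
      have hjj : j * j ≤ N := Nat.le_sqrt.mp (by omega)
      have hjle : j ≤ N / j := Nat.le_of_mul_le_mul_right (by nlinarith [hdj]) (by omega)
      have hjlt : j < N / j := by omega
      refine ⟨⟨⟨by omega, by nlinarith [hdj]⟩, ⟨j, hdj.symm⟩⟩, ?_⟩
      nlinarith [hdj]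
    · intro d hd
      simp only [Finset.mem_filter, Finset.mem_Ico] at hd
      exact Nat.div_div_self hd.1.2 hN0
    · intro j hj
      simp only [Finset.mem_filter, Finset.mem_Ico] at hj
      exact Nat.div_div_self hj.1.2 hN0
    · intro d hd
      simp only [Finset.mem_filter, Finset.mem_Ico] at hd
      rw [Nat.div_div_self hd.1.2 hN0]
  rw [hhigh]
  push_cast
  ring

-- ===== VERDICT (by name: the statement is the Claim_ definition above) =====
theorem isFriendNumber_spec : Claim_equal_isFriendNumber := by
  intro number number2 _
  unfold Spec_isFriendNumber isFriendNumber isFriendNumber_alt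
  by_cases h : number < 2
  · have : PySem.List.pyRange 1 number 1 = [] := PySem.List.pyRange_one_eq_nil (by omega)
    simp only [this, List.foldl_nil]
    by_cases hz : number2 = 0 <;> simp [hz, h, eq_comm]
  · have h2 : (2 : Int) ≤ number := by omega
    set N := number.toNat with hN
    have hcast : (N : Int) = number := by omega
    have hN2 : 2 ≤ N := by omega
    rw [← hcast]
    have hA := aLoop_eq N 1 0 le_rfl
    have hfuel : ((N : Int) - 1).toNat = N - 1 := by omega
    have hB := bLoop_eq N (N - 1) 2 1 (by omega)
      (by have := Nat.sqrt_le_self N; omega)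
    rw [hfuel]
    simp only [Nat.cast_one, Nat.cast_ofNat] at hA hB
    have hp := pair_eq N hN2
    rw [if_neg (by omega : ¬ (N : Int) < 2), hA, zero_add, ← hp, ← hB]
    simp
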